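-- pv_equiv track=rewrite | github.com/wdnei/identificarTartarugas | v2/classificar/MomentosCromaticidade.py | gerar_combinacao
-- ===== SOURCE A (Python) =====
-- def gerar_combinacao(qtdMax):
--         """ Gera um vetor de um dado maximo de numero, para ser usado no calculo de momentos
--          ex: gerar_combinacao(5)->[[0, 0], [1, 0], [0, 1], [2, 0], [0, 2]]
--          """
--         if(qtdMax<=0):
--                 return []
--         combinacao=[[0,0]]
--         for i in range(int(qtdMax/2)+1):
--                 for j in range(i):
--                         if(len(combinacao)<qtdMax):
--                                 combinacao.append([i,j])
--                         if(len(combinacao)<qtdMax):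
--                                 combinacao.append([j,i])
--                 if(len(combinacao)>=qtdMax):
--                         break
--         return combinacao
-- ===== SOURCE B (Python) =====
-- def _isqrt(n):
--     # exact integer square root (recursive digit-pair method)
--     if n < 2:
--         return n
--     x = 2 * _isqrt(n >> 2)
--     return x + 1 if (x + 1) * (x + 1) <= n else x
--
--
-- def gerar_combinacao(qtdMax):
--     """ Gera um vetor de um dado maximo de numero, para ser usado no calculo de momentos
--      ex: gerar_combinacao(5)->[[0, 0], [1, 0], [0, 1], [2, 0], [0, 2]]
--      """
--     if qtdMax <= 0:
--         return []
--     out = []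
--     for n in range(qtdMax):
--         if n == 0:
--             out.append([0, 0])
--         else:
--             i = (_isqrt(4 * n - 3) + 1) // 2
--             p = n - 1 - (i - 1) * i
--             out.append([i, p // 2] if p % 2 == 0 else [p // 2, i])
--     return out
-- ===== Notes on version B (the rewrite author's own statement) =====
-- stated objective: alternative
-- what changed: Replaces A's nested break-guarded shell loops by a direct map over output indices: each index n is sent to its pair by a closed form (shell found via an integer square root, position parity picks [i,p//2] vs [p//2,i]).
import Mathlib
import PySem

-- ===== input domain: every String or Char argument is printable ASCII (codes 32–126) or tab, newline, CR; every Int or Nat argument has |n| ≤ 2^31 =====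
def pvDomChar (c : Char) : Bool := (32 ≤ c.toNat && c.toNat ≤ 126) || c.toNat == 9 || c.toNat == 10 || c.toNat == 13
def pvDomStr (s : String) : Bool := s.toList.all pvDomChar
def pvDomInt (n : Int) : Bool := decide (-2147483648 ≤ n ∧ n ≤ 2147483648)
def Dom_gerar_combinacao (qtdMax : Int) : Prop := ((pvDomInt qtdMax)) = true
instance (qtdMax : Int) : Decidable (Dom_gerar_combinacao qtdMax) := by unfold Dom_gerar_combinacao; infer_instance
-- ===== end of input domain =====

-- B replaces A's nested break-guarded loops by a per-index closed form (alternative decomposition, same result).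

-- ===== PORT A =====
-- inner 'for j in range(i)' with the two guarded appends
def gerarInnerA (q : Int) (i : Int) (acc : List (List Int)) : List (List Int) :=
  (PySem.List.pyRange 0 i 1).foldl (fun acc j =>
    let acc1 := if (acc.length : Int) < q then acc ++ [[i, j]] else acc
    if (acc1.length : Int) < q then acc1 ++ [[j, i]] else acc1) acc

-- outer 'for i in range(...)' with the trailing 'break'
def gerarLoopA (q : Int) : List Int → List (List Int) → List (List Int)
  | [], acc => acc
  | i :: rest, acc =>
    let acc := gerarInnerA q i acc
    if (acc.length : Int) ≥ q then acc else gerarLoopA q rest acc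

def gerar_combinacao (qtdMax : Int) : List (List Int) :=
  if qtdMax ≤ 0 then []
  else
    -- int(qtdMax/2): exact float division on this domain, then truncation toward zero = Int.tdiv
    gerarLoopA qtdMax (PySem.List.pyRange 0 (qtdMax.tdiv 2 + 1) 1) [[0, 0]]

-- ===== PORT B =====
-- port of Source B's _isqrt (recursion on n >> 2 = n / 4); Nat core for the n ≥ 2 recursion
def pyIsqrtNat (n : Nat) : Nat :=
  if h : n < 2 then n
  else
    let x := 2 * pyIsqrtNat (n / 4)
    if (x + 1) * (x + 1) ≤ n then x + 1 else x
decreasing_by exact Nat.div_lt_self (by omega) (by omega)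

-- exact: Python's _isqrt returns n itself for n < 2 (incl. negatives); for n ≥ 2 the recursion stays in ℕ
def pyIsqrt (n : Int) : Int :=
  if n < 2 then n else (pyIsqrtNat n.toNat : Int)

def gerar_combinacao_alt (qtdMax : Int) : List (List Int) :=
  if qtdMax ≤ 0 then []
  else
    (PySem.List.pyRange 0 qtdMax 1).map (fun n =>
      if n = 0 then [0, 0]
      else
        let i := PySem.Int.floordiv (pyIsqrt (4 * n - 3) + 1) 2
        let p := n - 1 - (i - 1) * i
        if PySem.Int.mod p 2 = 0 then [i, PySem.Int.floordiv p 2]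
        else [PySem.Int.floordiv p 2, i])

-- ===== PRECONDITION & SPEC =====
def Spec_gerar_combinacao (qtdMax : Int) (out : List (List Int)) : Prop := out = gerar_combinacao_alt qtdMax
instance (qtdMax : Int) (out : List (List Int)) : Decidable (Spec_gerar_combinacao qtdMax out) := by unfold Spec_gerar_combinacao; infer_instance

-- ===== CLAIM (what is proved, stated in full; the proofs are below) =====
def Claim_equal_gerar_combinacao : Prop := ∀ (qtdMax : Int), Dom_gerar_combinacao qtdMax → Spec_gerar_combinacao qtdMax (gerar_combinacao qtdMax)

-- ===== LEMMAS AND PROOFS =====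

-- the n-th output pair, in ℕ
def seqP (n : Nat) : List Int :=
  if n = 0 then [0, 0]
  else
    let i := (Nat.sqrt (4 * n - 3) + 1) / 2
    let p := (n - 1) - (i - 1) * i
    if p % 2 = 0 then [(i : Int), ((p / 2 : Nat) : Int)] else [((p / 2 : Nat) : Int), (i : Int)]

-- prefix of the output sequence
def prefP (k : Nat) : List (List Int) := (List.range k).map seqP

-- capacity after shells 0..m
def capP (m : Nat) : Nat := 1 + m * (m + 1)

theorem pyIsqrtNat_eq (n : Nat) : pyIsqrtNat n = Nat.sqrt n := by
  induction n using Nat.strong_induction_on with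
  | _ n ih =>
    rw [pyIsqrtNat]
    split
    · next h => interval_cases n <;> simp
    · next h =>
      have hrec := ih (n / 4) (Nat.div_lt_self (by omega) (by omega))
      simp only [hrec]
      set s := Nat.sqrt (n / 4) with hs
      have h1 : s * s ≤ n / 4 := by have := Nat.sqrt_le' (n / 4); rw [pow_two] at this; exact this
      have h2 : n / 4 < (s + 1) * (s + 1) := by have := Nat.lt_succ_sqrt' (n / 4); rw [Nat.succ_eq_add_one, pow_two] at this; exact this
      have e1 : (s + 1) * (s + 1) = s * s + 2 * s + 1 := by ring
      have e2 : (2 * s + 1) * (2 * s + 1) = 4 * (s * s) + 4 * s + 1 := by ring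
      have e3 : (2 * s + 2) * (2 * s + 2) = 4 * (s * s) + 8 * s + 4 := by ring
      have e4 : (2 * s) * (2 * s) = 4 * (s * s) := by ring
      split
      · next hle =>
        symm
        apply le_antisymm
        · have : n < (2 * s + 2) * (2 * s + 2) := by omega
          exact Nat.lt_succ_iff.mp (Nat.sqrt_lt'.mpr (by rw [Nat.succ_eq_add_one, pow_two]; omega))
        · exact Nat.le_sqrt'.mpr (by rw [pow_two]; omega)
      · next hgt =>
        symm
        apply le_antisymm
        · have : n < (2 * s + 1) * (2 * s + 1) := by omega
          exact Nat.lt_succ_iff.mp (Nat.sqrt_lt'.mpr (by rw [Nat.succ_eq_add_one, pow_two]; omega))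
        · exact Nat.le_sqrt'.mpr (by rw [pow_two]; omega)

-- shell identification: the index with (2i-1)² ≤ 4n-3 < (2i+1)² is recovered by the sqrt formula
theorem sqrt_shell (k p : Nat) (hp : p < 2 * (k + 1)) :
    (Nat.sqrt (4 * (1 + k * (k + 1) + p) - 3) + 1) / 2 = k + 1 := by
  set n := 1 + k * (k + 1) + p with hn
  have e : 4 * n - 3 = 4 * (k * (k + 1)) + 1 + 4 * p := by omega
  have hl : 2 * k + 1 ≤ Nat.sqrt (4 * n - 3) := by
    apply Nat.le_sqrt'.mpr
    rw [pow_two]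
    have : (2 * k + 1) * (2 * k + 1) = 4 * (k * (k + 1)) + 1 := by ring
    omega
  have hu : Nat.sqrt (4 * n - 3) < 2 * k + 3 := by
    apply Nat.sqrt_lt'.mpr
    rw [pow_two]
    have : (2 * k + 3) * (2 * k + 3) = 4 * (k * (k + 1)) + 8 * k + 9 := by ring
    omega
  omega

theorem seqP_band (k p : Nat) (hp : p < 2 * (k + 1)) :
    seqP (1 + k * (k + 1) + p) =
      (if p % 2 = 0 then [((k + 1 : Nat) : Int), ((p / 2 : Nat) : Int)]
       else [((p / 2 : Nat) : Int), ((k + 1 : Nat) : Int)]) := by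
  have hsh := sqrt_shell k p hp
  simp only [seqP]
  rw [if_neg (by omega)]
  simp only [hsh]
  have hsub : (1 + k * (k + 1) + p - 1) - (k + 1 - 1) * (k + 1) = p := by
    have : (k + 1 - 1) * (k + 1) = k * (k + 1) := by congr 1
    rw [this]; omega
  rw [hsub]

theorem prefP_length (k : Nat) : (prefP k).length = k := by
  simp [prefP]

theorem prefP_snoc (k : Nat) : prefP (k + 1) = prefP k ++ [seqP k] := by
  simp [prefP, List.range_succ]

theorem inner_step (N k m : Nat) (hm : m ≤ k) :
    (fun (acc : List (List Int)) (j : Int) =>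
      let acc1 := if (acc.length : Int) < (N : Int) then acc ++ [[((k + 1 : Nat) : Int), j]] else acc
      if (acc1.length : Int) < (N : Int) then acc1 ++ [[j, ((k + 1 : Nat) : Int)]] else acc1)
      (prefP (min N (capP k + 2 * m))) ((m : Nat) : Int) =
      prefP (min N (capP k + 2 * m + 2)) := by
  have hb1 : seqP (capP k + 2 * m) = [((k + 1 : Nat) : Int), ((m : Nat) : Int)] := by
    have := seqP_band k (2 * m) (by omega)
    have e : 1 + k * (k + 1) + 2 * m = capP k + 2 * m := by unfold capP; omega
    rw [e] at this
    rw [this, if_pos (by omega)]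
    congr 2
    omega
  have hb2 : seqP (capP k + 2 * m + 1) = [((m : Nat) : Int), ((k + 1 : Nat) : Int)] := by
    have := seqP_band k (2 * m + 1) (by omega)
    have e : 1 + k * (k + 1) + (2 * m + 1) = capP k + 2 * m + 1 := by unfold capP; omega
    rw [e] at this
    rw [this, if_neg (by omega)]
    congr 2
    omega
  simp only []
  split_ifs with h1 h2
  · -- both appends taken
    rw [prefP_length] at h1
    simp only [List.length_append, prefP_length, List.length_cons, List.length_nil] at h2
    have hc1 : min N (capP k + 2 * m) = capP k + 2 * m := by
      have := Nat.cast_lt.mp h1; omega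
    have hc2 : capP k + 2 * m + 1 < N := by
      rw [hc1] at h2; exact_mod_cast (by exact_mod_cast h2 : ((capP k + 2 * m + 1 : Nat) : Int) < (N : Int))
    rw [hc1]
    have hmin : min N (capP k + 2 * m + 2) = capP k + 2 * m + 2 := by omega
    rw [hmin]
    rw [prefP_snoc (capP k + 2 * m + 1), prefP_snoc (capP k + 2 * m), hb1, hb2]
  · -- first append taken, second rejected: N = c + 2m + 1
    rw [prefP_length] at h1
    simp only [List.length_append, prefP_length, List.length_cons, List.length_nil] at h2
    have hc1 : min N (capP k + 2 * m) = capP k + 2 * m := by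
      have := Nat.cast_lt.mp h1; omega
    have hc2 : ¬ (capP k + 2 * m + 1 < N) := by
      rw [hc1] at h2
      intro hlt
      exact h2 (by exact_mod_cast hlt)
    have hlt : capP k + 2 * m < N := by have := Nat.cast_lt.mp h1; omega
    have hmin : min N (capP k + 2 * m + 2) = N := by omega
    have hNeq : N = capP k + 2 * m + 1 := by omega
    rw [hc1, hmin, hNeq]
    rw [prefP_snoc (capP k + 2 * m), hb1]
  · -- both rejected: prefix already full
    rw [prefP_length] at h1
    have hge : N ≤ capP k + 2 * m := by
      by_contra hcon
      exact h1 (by exact_mod_cast (by omega : min N (capP k + 2 * m) < N))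
    have hmin1 : min N (capP k + 2 * m) = N := by omega
    have hmin2 : min N (capP k + 2 * m + 2) = N := by omega
    rw [hmin1, hmin2]

theorem inner_spec (N i : Nat) (_hN : 0 < N) :
    gerarInnerA (N : Int) (i : Int) (prefP (min N (capP (i - 1)))) =
      prefP (min N (capP i)) := by
  cases i with
  | zero =>
    simp [gerarInnerA]
  | succ k =>
    unfold gerarInnerA
    rw [PySem.List.pyRange_one]
    simp only [sub_zero, Int.toNat_natCast, List.foldl_map, zero_add, Nat.add_sub_cancel]
    have main : ∀ j, j ≤ k + 1 →
        (List.range j).foldl (fun (acc : List (List Int)) (x : Nat) =>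
          let acc1 := if (acc.length : Int) < ((k + 1 : Nat) : Int) * 0 + (N : Int) then acc ++ [[((k + 1 : Nat) : Int), (x : Int)]] else acc
          if (acc1.length : Int) < ((k + 1 : Nat) : Int) * 0 + (N : Int) then acc1 ++ [[(x : Int), ((k + 1 : Nat) : Int)]] else acc1)
          (prefP (min N (capP k))) = prefP (min N (capP k + 2 * j)) := by
      intro j
      induction j with
      | zero => intro _; simp
      | succ m ihm =>
        intro hj
        rw [List.range_succ, List.foldl_append, ihm (by omega)]
        simp only [List.foldl_cons, List.foldl_nil]
        have := inner_step N k m (by omega)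
        simpa using this
    have hfin := main (k + 1) (le_refl _)
    have e : capP k + 2 * (k + 1) = capP (k + 1) := by unfold capP; ring
    rw [e] at hfin
    simpa using hfin

theorem loop_spec (cnt : Nat) : ∀ (i N : Nat), 0 < N → 1 ≤ cnt → N ≤ capP (i + cnt - 1) →
    gerarLoopA (N : Int) (PySem.List.pyRange (i : Int) ((i : Int) + (cnt : Int)) 1)
      (prefP (min N (capP (i - 1)))) = prefP N := by
  induction cnt with
  | zero => intro i N _ h1 _; omega
  | succ c ih =>
    intro i N hN _ hcap
    rw [PySem.List.pyRange_one_cons (by push_cast; omega)]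
    rw [gerarLoopA]
    simp only [inner_spec N i hN]
    by_cases hbr : N ≤ capP i
    · rw [if_pos (by rw [prefP_length]; push_cast; omega)]
      congr 1; omega
    · rw [if_neg (by rw [prefP_length]; push_cast; omega)]
      have hc : 1 ≤ c := by
        rcases Nat.eq_zero_or_pos c with h0 | h0
        · subst h0; simp at hcap; omega
        · omega
      have := ih (i + 1) N hN hc (by
        have : i + 1 + c - 1 = i + (c + 1) - 1 := by omega
        rw [this]; exact hcap)
      have harg : (i : Int) + 1 = ((i + 1 : Nat) : Int) := by push_cast; ring
      have harg2 : (i : Int) + ((c + 1 : Nat) : Int) = ((i + 1 : Nat) : Int) + ((c : Nat) : Int) := by push_cast; ring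
      rw [harg2, harg]
      have hmin : capP i = capP ((i + 1) - 1) := by simp
      rw [hmin] at *
      exact this

theorem cap_half (N : Nat) (_h : 0 < N) : N ≤ capP (N / 2) := by
  unfold capP
  rcases Nat.eq_zero_or_pos (N / 2) with h0 | h0
  · omega
  · have hk : N / 2 ≤ N / 2 * (N / 2) := Nat.le_mul_of_pos_left _ h0
    have he : N / 2 * (N / 2 + 1) = N / 2 * (N / 2) + N / 2 := by ring
    omega

theorem pyIsqrt_nonneg (n : Int) (_h : 0 ≤ n) : pyIsqrt n = (Nat.sqrt n.toNat : Int) := by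
  unfold pyIsqrt
  split
  · next hlt =>
    interval_cases n <;> simp
  · rw [pyIsqrtNat_eq]

theorem altBody_eq (m : Nat) :
    (if ((m : Nat) : Int) = 0 then ([0, 0] : List Int)
     else
       let i := PySem.Int.floordiv (pyIsqrt (4 * ((m : Nat) : Int) - 3) + 1) 2
       let p := ((m : Nat) : Int) - 1 - (i - 1) * i
       if PySem.Int.mod p 2 = 0 then [i, PySem.Int.floordiv p 2]
       else [PySem.Int.floordiv p 2, i]) = seqP m := by
  by_cases hm0 : m = 0
  · subst hm0; simp [seqP]
  · rw [if_neg (by exact_mod_cast hm0)]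
    simp only [seqP, if_neg hm0]
    have h4 : (4 * ((m : Nat) : Int) - 3) = ((4 * m - 3 : Nat) : Int) := by omega
    rw [h4, pyIsqrt_nonneg _ (Int.natCast_nonneg _), Int.toNat_natCast]
    set s := Nat.sqrt (4 * m - 3) with hs
    have hs1 : 1 ≤ s := Nat.le_sqrt'.mpr (by rw [pow_two]; omega)
    have hfd : PySem.Int.floordiv ((s : Int) + 1) 2 = (((s + 1) / 2 : Nat) : Int) := by
      have := PySem.Int.floordiv_natCast (s + 1) 2
      push_cast at this
      exact_mod_cast this
    rw [hfd]
    set iN := (s + 1) / 2 with hiN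
    obtain ⟨t, ht⟩ : ∃ t, iN = t + 1 := ⟨iN - 1, by omega⟩
    have hss : s * s ≤ 4 * m - 3 := by
      have := Nat.sqrt_le' (4 * m - 3); rw [pow_two] at this; rw [hs]; exact this
    have hmul : (2 * t + 1) * (2 * t + 1) ≤ s * s := Nat.mul_le_mul (by omega) (by omega)
    have e : (2 * t + 1) * (2 * t + 1) = 4 * (t * (t + 1)) + 1 := by ring
    have hkey : t * (t + 1) ≤ m - 1 := by omega
    have hu : ((((t + 1) : Nat) : Int) - 1) * (((t + 1) : Nat) : Int) = ((t * (t + 1) : Nat) : Int) := by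
      push_cast; ring
    have hsub : ((t + 1 - 1) : Nat) * (t + 1) = t * (t + 1) := by rw [Nat.add_sub_cancel]
    rw [ht, hu, hsub]
    have hpcast : ((m : Nat) : Int) - 1 - ((t * (t + 1) : Nat) : Int) = ((m - 1 - t * (t + 1) : Nat) : Int) := by
      have h1 : t * (t + 1) ≤ m - 1 := hkey
      omega
    rw [hpcast]
    set pN := m - 1 - t * (t + 1) with hpN
    have hmod : PySem.Int.mod ((pN : Nat) : Int) 2 = ((pN % 2 : Nat) : Int) := by
      have := PySem.Int.mod_natCast pN 2; exact_mod_cast this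
    have hdiv : PySem.Int.floordiv ((pN : Nat) : Int) 2 = ((pN / 2 : Nat) : Int) := by
      have := PySem.Int.floordiv_natCast pN 2; exact_mod_cast this
    rw [hmod, hdiv]
    by_cases hpar : pN % 2 = 0
    · rw [if_pos (by exact_mod_cast hpar), if_pos hpar]
    · rw [if_neg (by exact_mod_cast hpar), if_neg hpar]

theorem alt_eq_prefP (q : Int) (h : 0 < q) : gerar_combinacao_alt q = prefP q.toNat := by
  unfold gerar_combinacao_alt prefP
  rw [if_neg (by omega), PySem.List.pyRange_one]
  simp only [sub_zero, List.map_map]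
  apply List.map_congr_left
  intro m hm
  simp only [Function.comp_apply, zero_add]
  exact altBody_eq m


-- ===== VERDICT (by name: the statement is the Claim_ definition above) =====
theorem gerar_combinacao_spec : Claim_equal_gerar_combinacao := by
  intro q _
  unfold Spec_gerar_combinacao
  by_cases hq : q ≤ 0
  · simp [gerar_combinacao, gerar_combinacao_alt, hq]
  · replace hq : 0 < q := by omega
    rw [alt_eq_prefP q hq]
    set N := q.toNat with hN
    have hq' : (N : Int) = q := Int.toNat_of_nonneg (le_of_lt hq)
    have hNpos : 0 < N := by omega
    have htd : q.tdiv 2 = ((N / 2 : Nat) : Int) := by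
      rw [Int.tdiv_eq_ediv_of_nonneg (by omega)]; omega
    rw [gerar_combinacao, if_neg (by omega), htd]
    have hinit : [[(0 : Int), (0 : Int)]] = prefP (min N (capP (0 - 1))) := by
      have : min N (capP 0) = 1 := by unfold capP; omega
      simp only [Nat.zero_sub, this]
      simp [prefP, seqP, List.range_succ]
    have hcast : ((N / 2 : Nat) : Int) + 1 = ((0 : Nat) : Int) + ((N / 2 + 1 : Nat) : Int) := by
      push_cast; ring
    rw [hcast, hinit, ← hq']
    exact loop_spec (N / 2 + 1) 0 N hNpos (by omega) (by
      have h00 : 0 + (N / 2 + 1) - 1 = N / 2 := by omega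
      rw [h00]; exact cap_half N hNpos)
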